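-- pv_equiv track=rewrite | github.com/CCpatchCopalot/Copalot | 2.Prototype/joern.py | remove_subpaths
-- ===== SOURCE A (Python) =====
-- def remove_subpaths(path_list):
--     path_list.sort(key=len, reverse=True)
--
--     unique_paths = []
--     for path in path_list:
--         is_subpath = False
--         for existing_path in unique_paths:
--             if len(path) < len(existing_path) and all(elem in existing_path for elem in path):
--                 is_subpath = True
--                 break
--         if not is_subpath:
--             unique_paths.append(path)
--     return unique_paths
-- ===== SOURCE B (Python) =====
-- def remove_subpaths(path_list):
--     path_list.sort(key=len, reverse=True)
--     return [p for p in path_list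
--             if not any(len(p) < len(o) and all(e in o for e in p)
--                        for o in path_list)]
-- ===== Notes on version B (the rewrite author's own statement) =====
-- stated objective: simpler
-- what changed: Replaces the greedy accumulator with early break by a stateless filter: each path is tested against the whole sorted list (keep p iff no strictly longer path in the list contains all of p's elements); equivalence follows from subset transitivity.
import Mathlib
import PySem

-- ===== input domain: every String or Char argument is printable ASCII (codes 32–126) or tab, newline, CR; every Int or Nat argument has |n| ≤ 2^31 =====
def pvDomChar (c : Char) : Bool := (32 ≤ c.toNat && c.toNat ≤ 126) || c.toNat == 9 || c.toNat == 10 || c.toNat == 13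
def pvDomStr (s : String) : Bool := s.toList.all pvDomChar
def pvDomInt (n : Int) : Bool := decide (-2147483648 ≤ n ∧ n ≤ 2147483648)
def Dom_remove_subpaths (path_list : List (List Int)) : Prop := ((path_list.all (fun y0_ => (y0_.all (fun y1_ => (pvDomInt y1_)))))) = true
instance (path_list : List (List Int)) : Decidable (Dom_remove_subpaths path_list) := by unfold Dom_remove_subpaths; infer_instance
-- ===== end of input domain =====

-- B replaces A's greedy accumulator (with early break) by a stateless filter of the
-- sorted list against the whole sorted list; simpler, same cost. Both versions sort
-- the argument in place in Python; the equivalence proved here is about the return value.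

-- ===== PORT A =====
-- inner 'for existing_path in unique_paths: … break' loop of A
def pvIsSubLoop (p : List Int) : List (List Int) → Bool
  | [] => false
  | e :: rest =>
    if decide (p.length < e.length) && p.all (fun x => decide (x ∈ e)) then true
    else pvIsSubLoop p rest

-- outer 'for path in path_list' loop of A, accumulating unique_paths
def pvKeepLoop : List (List Int) → List (List Int) → List (List Int)
  | [], acc => acc
  | p :: rest, acc =>
    if pvIsSubLoop p acc then pvKeepLoop rest acc
    else pvKeepLoop rest (acc ++ [p])

def remove_subpaths (path_list : List (List Int)) : List (List Int) :=
  pvKeepLoop (PySem.List.sorted path_list (fun p => p.length) true) []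

-- ===== PORT B =====
-- 'any(len(p) < len(o) and all(e in o for e in p) for o in s)'
def pvHasLonger (s : List (List Int)) (p : List Int) : Bool :=
  s.any (fun o => decide (p.length < o.length) && p.all (fun e => decide (e ∈ o)))

def remove_subpaths_alt (path_list : List (List Int)) : List (List Int) :=
  let s := PySem.List.sorted path_list (fun p => p.length) true
  s.filter (fun p => !(pvHasLonger s p))

-- ===== PRECONDITION & SPEC =====
def Spec_remove_subpaths (path_list : List (List Int)) (out : List (List Int)) : Prop := out = remove_subpaths_alt path_list
instance (path_list : List (List Int)) (out : List (List Int)) : Decidable (Spec_remove_subpaths path_list out) := by unfold Spec_remove_subpaths; infer_instance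

-- ===== CLAIM (what is proved, stated in full; the proofs are below) =====
def Claim_equal_remove_subpaths : Prop := ∀ (path_list : List (List Int)), Dom_remove_subpaths path_list → Spec_remove_subpaths path_list (remove_subpaths path_list)

-- ===== LEMMAS AND PROOFS =====

-- the break-loop is List.any
lemma pvIsSubLoop_eq_any (p : List Int) (acc : List (List Int)) :
    pvIsSubLoop p acc = acc.any (fun o => decide (p.length < o.length) && p.all (fun x => decide (x ∈ o))) := by
  induction acc with
  | nil => rfl
  | cons e rest ih =>
    simp only [pvIsSubLoop, List.any_cons]
    split_ifs with h
    · simp [h]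
    · simp [h, ih]

-- subset transitivity for the boolean subset test
lemma pvSub_trans {p q r : List Int}
    (h1 : p.all (fun e => decide (e ∈ q)) = true)
    (h2 : q.all (fun e => decide (e ∈ r)) = true) :
    p.all (fun e => decide (e ∈ r)) = true := by
  simp only [List.all_eq_true, decide_eq_true_eq] at *
  exact fun e he => h2 _ (h1 e he)

-- any longer superset in s can be chosen among the paths s itself keeps
lemma exists_kept_witness (s : List (List Int)) (p : List Int)
    (h : pvHasLonger s p = true) :
    ∃ o ∈ s, p.length < o.length ∧ p.all (fun e => decide (e ∈ o)) = true ∧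
      pvHasLonger s o = false := by
  set W := s.filter (fun o => decide (p.length < o.length) && p.all (fun e => decide (e ∈ o))) with hW
  have hWne : W ≠ [] := by
    simp only [pvHasLonger, List.any_eq_true] at h
    obtain ⟨o, ho, hw⟩ := h
    intro hnil
    have : o ∈ W := by
      rw [hW]; exact List.mem_filter.mpr ⟨ho, hw⟩
    rw [hnil] at this; exact absurd this (List.not_mem_nil)
  obtain ⟨m, hm⟩ : ∃ m, m ∈ W.argmax (fun o => o.length) := by
    cases hcase : W.argmax (fun o => o.length) with
    | none => exact absurd (List.argmax_eq_none.mp hcase) hWne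
    | some m => exact ⟨m, by simp⟩
  have hmW : m ∈ W := List.argmax_mem hm
  have hms : m ∈ s ∧ (decide (p.length < m.length) && p.all (fun e => decide (e ∈ m))) = true :=
    List.mem_filter.mp hmW
  obtain ⟨hlt, hsub⟩ : p.length < m.length ∧ p.all (fun e => decide (e ∈ m)) = true := by
    have := hms.2
    simp only [Bool.and_eq_true, decide_eq_true_eq] at this
    exact this
  refine ⟨m, hms.1, hlt, hsub, ?_⟩
  by_contra hk
  have hk' : pvHasLonger s m = true := by
    cases hc : pvHasLonger s m
    · exact absurd hc hk
    · rfl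
  simp only [pvHasLonger, List.any_eq_true, Bool.and_eq_true, decide_eq_true_eq] at hk'
  obtain ⟨o2, ho2s, ho2lt, ho2sub⟩ := hk'
  have ho2W : o2 ∈ W := by
    rw [hW]
    refine List.mem_filter.mpr ⟨ho2s, ?_⟩
    simp only [Bool.and_eq_true, decide_eq_true_eq]
    exact ⟨lt_trans hlt ho2lt, pvSub_trans hsub ho2sub⟩
  exact List.not_lt_of_mem_argmax ho2W hm ho2lt

-- main loop invariant: acc is the filter of the processed prefix
lemma pvKeepLoop_eq (s : List (List Int))
    (hs : s.Pairwise (fun a b => b.length ≤ a.length)) :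
    ∀ (rest acc pre : List (List Int)), s = pre ++ rest →
      acc = pre.filter (fun p => !(pvHasLonger s p)) →
      pvKeepLoop rest acc = acc ++ rest.filter (fun p => !(pvHasLonger s p)) := by
  intro rest
  induction rest with
  | nil => intro acc pre _ _; simp [pvKeepLoop]
  | cons p rest ih =>
    intro acc pre hsplit hacc
    have hrest_le : ∀ o ∈ rest, o.length ≤ p.length := by
      have := hs
      rw [hsplit] at this
      have h2 := (List.pairwise_append.mp this).2.1
      exact fun o ho => (List.pairwise_cons.mp h2).1 o ho
    have hlong_pre : ∀ o ∈ s, p.length < o.length → o ∈ pre := by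
      intro o hos holt
      rw [hsplit] at hos
      rcases List.mem_append.mp hos with h | h
      · exact h
      · rcases List.mem_cons.mp h with h | h
        · subst h; omega
        · exact absurd holt (by have := hrest_le o h; omega)
    cases hcase : pvHasLonger s p with
    | true =>
      obtain ⟨o, hos, holt, hosub, hokeep⟩ := exists_kept_witness s p hcase
      have hoacc : o ∈ acc := by
        rw [hacc]
        exact List.mem_filter.mpr ⟨hlong_pre o hos holt, by simp [hokeep]⟩
      have hisub : pvIsSubLoop p acc = true := by
        rw [pvIsSubLoop_eq_any]
        simp only [List.any_eq_true]
        exact ⟨o, hoacc, by simp [holt, hosub]⟩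
      simp only [pvKeepLoop, hisub, if_true]
      have hstep := ih acc (pre ++ [p]) (by rw [hsplit]; simp)
        (by rw [hacc, List.filter_append]; simp [hcase])
      rw [hstep]
      simp [hcase]
    | false =>
      have hisub : pvIsSubLoop p acc = false := by
        rw [pvIsSubLoop_eq_any]
        by_contra hne
        have hany : acc.any (fun o => decide (p.length < o.length) && p.all (fun x => decide (x ∈ o))) = true := by
          cases hc : acc.any (fun o => decide (p.length < o.length) && p.all (fun x => decide (x ∈ o)))
          · exact absurd hc hne
          · rfl
        simp only [List.any_eq_true] at hany
        obtain ⟨o, hoacc, hw⟩ := hany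
        have hos : o ∈ s := by
          rw [hsplit]
          exact List.mem_append.mpr (Or.inl (List.mem_filter.mp (hacc ▸ hoacc)).1)
        have : pvHasLonger s p = true := by
          simp only [pvHasLonger, List.any_eq_true]
          exact ⟨o, hos, hw⟩
        rw [hcase] at this; exact absurd this (by simp)
      simp only [pvKeepLoop, hisub, Bool.false_eq_true, if_false]
      have hstep := ih (acc ++ [p]) (pre ++ [p]) (by rw [hsplit]; simp)
        (by rw [hacc, List.filter_append]; simp [hcase])
      rw [hstep]
      simp [hcase]

-- ===== VERDICT (by name: the statement is the Claim_ definition above) =====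
theorem remove_subpaths_spec : Claim_equal_remove_subpaths := by
  intro path_list _
  unfold Spec_remove_subpaths remove_subpaths remove_subpaths_alt
  have hs : (PySem.List.sorted path_list (fun p => p.length) true).Pairwise
      (fun a b => b.length ≤ a.length) := PySem.List.sorted_pairwise_rev _ _
  simpa using
    (pvKeepLoop_eq (PySem.List.sorted path_list (fun p => p.length) true) hs
      (PySem.List.sorted path_list (fun p => p.length) true) [] [] (by simp) (by simp))
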